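-- pv_equiv track=rewrite | github.com/oden73/BSUIR | sem4/AOIS/LW3/calculation_method/calculation_method.py | get_gluing_lists
-- ===== SOURCE A (Python) =====
-- def get_gluing_lists(expression_arguments: list[str], expression_values: list[int], difference_value_position: int,
--                      difference_arguments_position) -> (list[str], list[bool]):
--     gluing_arguments: list[str] = []
--     gluing_values: list[int] = expression_values[:]
--     for i in range(len(expression_arguments)):
--         if i != difference_arguments_position:
--             gluing_arguments.append(expression_arguments[i])
--         elif i == difference_value_position:
--             gluing_values[i] = -1
--     return gluing_arguments, gluing_values
-- ===== SOURCE B (Python) =====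
-- def get_gluing_lists(expression_arguments: list[str], expression_values: list[int], difference_value_position: int,
--                      difference_arguments_position) -> (list[str], list[bool]):
--     dap = difference_arguments_position
--     if 0 <= dap < len(expression_arguments):
--         gluing_arguments = expression_arguments[:dap] + expression_arguments[dap + 1:]
--         if dap == difference_value_position:
--             gluing_values = expression_values[:dap] + [-1] + expression_values[dap + 1:]
--         else:
--             gluing_values = expression_values[:]
--     else:
--         gluing_arguments = expression_arguments[:]
--         gluing_values = expression_values[:]
--     return gluing_arguments, gluing_values
-- ===== Notes on version B (the rewrite author's own statement) =====
-- stated objective: alternative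
-- what changed: Replaces A's per-index scan (append each kept element, mutate the copied values list inside the loop) by whole-list slicing: the removed position is cut out by concatenating the slices around it, and the -1 mark is built by splicing [-1] between the two value slices, with no element loop at all.
import Mathlib
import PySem

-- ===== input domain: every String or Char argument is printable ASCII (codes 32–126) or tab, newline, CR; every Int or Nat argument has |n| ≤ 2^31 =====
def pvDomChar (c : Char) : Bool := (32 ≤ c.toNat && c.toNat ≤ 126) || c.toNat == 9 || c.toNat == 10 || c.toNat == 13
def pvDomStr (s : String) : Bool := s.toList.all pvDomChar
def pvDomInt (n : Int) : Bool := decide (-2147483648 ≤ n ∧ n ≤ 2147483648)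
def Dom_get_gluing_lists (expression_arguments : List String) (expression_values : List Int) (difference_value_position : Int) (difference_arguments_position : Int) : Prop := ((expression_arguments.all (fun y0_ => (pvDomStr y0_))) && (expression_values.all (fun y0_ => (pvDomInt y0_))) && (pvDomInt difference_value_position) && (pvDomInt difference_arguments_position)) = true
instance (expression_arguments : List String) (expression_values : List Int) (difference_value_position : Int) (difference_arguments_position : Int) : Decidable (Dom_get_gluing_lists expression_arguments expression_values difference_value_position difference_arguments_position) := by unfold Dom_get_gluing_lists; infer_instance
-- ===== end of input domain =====

-- B replaces A's per-index scan (append-or-mutate inside one loop) by whole-list slicing: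
-- cut the removed position out by concatenating the slices around it and splice [-1]
-- between the value slices; alternative decomposition, same O(n) cost.

-- ===== PORT A =====
-- literal port of A's loop; the write gluing_values[i] = -1 is ported with pySetD, which is
-- exact under Pre_ (Pre_ excludes exactly the inputs on which that write raises IndexError)
def get_gluing_lists (expression_arguments : List String) (expression_values : List Int) (difference_value_position : Int) (difference_arguments_position : Int) : List String × List Int :=
  (PySem.List.pyRange 0 expression_arguments.length 1).foldl
    (fun (st : List String × List Int) i =>
      if i ≠ difference_arguments_position then
        (st.1 ++ [PySem.List.pyGetD expression_arguments i ""], st.2)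
      else if i = difference_value_position then
        (st.1, PySem.List.pySetD st.2 i (-1))
      else st)
    ([], expression_values)

-- ===== PORT B =====
-- literal port of Source B: slice-and-concatenate, no element loop
def get_gluing_lists_alt (expression_arguments : List String) (expression_values : List Int) (difference_value_position : Int) (difference_arguments_position : Int) : List String × List Int :=
  let dap := difference_arguments_position
  if 0 ≤ dap ∧ dap < (expression_arguments.length : Int) then
    let gluing_arguments :=
      PySem.List.slice expression_arguments none (some dap) ++
      PySem.List.slice expression_arguments (some (dap + 1)) none
    let gluing_values :=
      if dap = difference_value_position then
        PySem.List.slice expression_values none (some dap) ++ [-1] ++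
        PySem.List.slice expression_values (some (dap + 1)) none
      else expression_values
    (gluing_arguments, gluing_values)
  else (expression_arguments, expression_values)

-- ===== PRECONDITION & SPEC =====
-- Pre_ excludes exactly the inputs on which the Python A raises IndexError (the -1 write lands
-- past the end of expression_values).
def Pre_get_gluing_lists (expression_arguments : List String) (expression_values : List Int) (difference_value_position : Int) (difference_arguments_position : Int) : Prop :=
  ¬ (difference_arguments_position = difference_value_position ∧
     0 ≤ difference_arguments_position ∧
     difference_arguments_position < (expression_arguments.length : Int) ∧
     (expression_values.length : Int) ≤ difference_arguments_position)
instance (expression_arguments : List String) (expression_values : List Int) (difference_value_position : Int) (difference_arguments_position : Int) : Decidable (Pre_get_gluing_lists expression_arguments expression_values difference_value_position difference_arguments_position) := by unfold Pre_get_gluing_lists; infer_instance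

def pvWitness_get_gluing_lists : List String × List Int × Int × Int := (["a", "b", "c"], [0, 1, 1], 1, 1)

def Spec_get_gluing_lists (expression_arguments : List String) (expression_values : List Int) (difference_value_position : Int) (difference_arguments_position : Int) (out : List String × List Int) : Prop := out = get_gluing_lists_alt expression_arguments expression_values difference_value_position difference_arguments_position
instance (expression_arguments : List String) (expression_values : List Int) (difference_value_position : Int) (difference_arguments_position : Int) (out : List String × List Int) : Decidable (Spec_get_gluing_lists expression_arguments expression_values difference_value_position difference_arguments_position out) := by unfold Spec_get_gluing_lists; infer_instance

-- ===== CLAIM (what is proved, stated in full; the proofs are below) =====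
def Claim_equal_get_gluing_lists : Prop := ∀ (expression_arguments : List String) (expression_values : List Int) (difference_value_position : Int) (difference_arguments_position : Int), Dom_get_gluing_lists expression_arguments expression_values difference_value_position difference_arguments_position → Pre_get_gluing_lists expression_arguments expression_values difference_value_position difference_arguments_position → Spec_get_gluing_lists expression_arguments expression_values difference_value_position difference_arguments_position (get_gluing_lists expression_arguments expression_values difference_value_position difference_arguments_position)

-- ===== LEMMAS AND PROOFS =====

-- loop invariant: after the first k iterations of A's loop the state is the filtered
-- enumeration of the first k elements and the conditionally-updated values list
theorem get_gluing_lists_invariant (ea : List String) (ev : List Int) (dvp dap : Int)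
    (k : Nat) (hk : k ≤ ea.length) :
    (PySem.List.pyRange 0 k 1).foldl
      (fun (st : List String × List Int) i =>
        if i ≠ dap then (st.1 ++ [PySem.List.pyGetD ea i ""], st.2)
        else if i = dvp then (st.1, PySem.List.pySetD st.2 i (-1))
        else st)
      ([], ev)
    = (((PySem.List.enumerate (ea.take k) 0).filter (fun p => p.1 ≠ dap)).map Prod.snd,
       if dap = dvp ∧ 0 ≤ dap ∧ dap < (k : Int) then PySem.List.pySetD ev dap (-1) else ev) := by
  induction k with
  | zero =>
      simp [PySem.List.enumerate_nil]
  | succ k ih =>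
      have hk' : k ≤ ea.length := Nat.le_of_succ_le hk
      have hlt : k < ea.length := hk
      have hcast : ((k + 1 : Nat) : Int) = (k : Int) + 1 := by push_cast; ring
      rw [hcast, PySem.List.pyRange_one_succ_right (by positivity), List.foldl_append,
        ih hk']
      have htake : ea.take (k + 1) = ea.take k ++ [ea[k]] := by
        rw [List.take_add_one]
        simp [List.getElem?_eq_getElem hlt]
      rw [htake, PySem.List.enumerate_append]
      simp only [List.foldl_cons, List.foldl_nil, List.length_take, Nat.min_eq_left hk',
        PySem.List.enumerate_cons, PySem.List.enumerate_nil, List.filter_append, List.map_append]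
      by_cases hdap : (k : Int) = dap
      · subst hdap
        simp only [ne_eq, not_true_eq_false, if_false, zero_add]
        by_cases hdvp : (k : Int) = dvp
        · have hcond' : ((k : Int) = dvp ∧ 0 ≤ (k : Int) ∧ (k : Int) < (k : Int) + 1) := by
            exact ⟨hdvp, by positivity, by omega⟩
          simp [hcond']
          intro h
          omega
        · have h2 : ¬ ((k : Int) = dvp ∧ 0 ≤ (k : Int) ∧ (k : Int) < (k : Int) + 1) := by
            intro h; exact hdvp h.1
          simp [hdvp]
      · have hcond : (dap = dvp ∧ 0 ≤ dap ∧ dap < (k : Int) + 1) ↔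
            (dap = dvp ∧ 0 ≤ dap ∧ dap < (k : Int)) := by
          constructor <;> (intro h; exact ⟨h.1, h.2.1, by omega⟩)
        simp only [ne_eq, hdap, not_false_eq_true, if_true, zero_add]
        rw [if_congr hcond rfl rfl]
        congr 1
        simp [hdap, PySem.List.pyGetD_natCast, List.getD_eq_getElem?_getD,
          List.getElem?_eq_getElem hlt]

-- the filtered enumeration keeps everything when the removed index lies below the start
theorem filter_enumerate_all (ea : List String) (dap s : Int) (h : dap < s) :
    ((PySem.List.enumerate ea s).filter (fun p => p.1 ≠ dap)).map Prod.snd = ea := by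
  induction ea generalizing s with
  | nil => simp [PySem.List.enumerate_nil]
  | cons x xs ih =>
      have hih := ih (s + 1) (by omega)
      rw [PySem.List.enumerate_cons]
      simp only [List.filter_cons]
      simp [show s ≠ dap by omega]
      simpa using hih

-- the filtered enumeration is the two slices around the removed index
theorem filter_enumerate_slices (ea : List String) (dap s : Int) (h : s ≤ dap) :
    ((PySem.List.enumerate ea s).filter (fun p => p.1 ≠ dap)).map Prod.snd
      = ea.take (dap - s).toNat ++ ea.drop ((dap - s).toNat + 1) := by
  induction ea generalizing s with
  | nil => simp [PySem.List.enumerate_nil]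
  | cons x xs ih =>
      rw [PySem.List.enumerate_cons]
      simp only [List.filter_cons]
      by_cases hs : s = dap
      · subst hs
        have hall := filter_enumerate_all xs s (s + 1) (by omega)
        simp
        simpa using hall
      · have hn : (dap - s).toNat = (dap - (s + 1)).toNat + 1 := by omega
        have hih := ih (s + 1) (by omega)
        rw [hn]
        simp [hs]
        simpa using hih

-- List.set as take / cons / drop (used to rewrite A's pySetD write into B's splice)
theorem set_eq_take_append_drop (ev : List Int) (n : Nat) (v : Int) (h : n < ev.length) :
    ev.set n v = ev.take n ++ [v] ++ ev.drop (n + 1) := by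
  induction ev generalizing n with
  | nil => simp at h
  | cons x xs ih =>
      cases n with
      | zero => simp
      | succ n => simp [ih n (by simpa using h)]

-- ===== VERDICT (by name: the statement is the Claim_ definition above) =====
theorem get_gluing_lists_spec : Claim_equal_get_gluing_lists := by
  intro ea ev dvp dap _ hpre
  unfold Spec_get_gluing_lists get_gluing_lists get_gluing_lists_alt
  rw [get_gluing_lists_invariant ea ev dvp dap ea.length (le_refl _)]
  simp only [List.take_length]
  by_cases hin : 0 ≤ dap ∧ dap < (ea.length : Int)
  · rw [if_pos hin]
    refine congrArg₂ Prod.mk ?_ ?_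
    · -- arguments component
      rw [filter_enumerate_slices ea dap 0 hin.1, show dap - 0 = dap by ring,
        PySem.List.slice_to ea hin.1, PySem.List.slice_from ea (by omega : (0:Int) ≤ dap + 1),
        show (dap + 1).toNat = dap.toNat + 1 by omega]
    · -- values component
      by_cases hdv : dap = dvp
      · have hlen : dap < (ev.length : Int) := by
          unfold Pre_get_gluing_lists at hpre
          omega
        rw [if_pos ⟨hdv, hin.1, hin.2⟩, if_pos hdv,
          PySem.List.pySetD_of_nonneg ev (-1) hin.1,
          set_eq_take_append_drop ev dap.toNat (-1) (by omega),
          PySem.List.slice_to ev hin.1, PySem.List.slice_from ev (by omega : (0:Int) ≤ dap + 1),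
          show (dap + 1).toNat = dap.toNat + 1 by omega]
      · rw [if_neg (fun h => hdv h.1), if_neg hdv]
  · rw [if_neg hin, if_neg (fun h => hin ⟨h.2.1, h.2.2⟩)]
    refine congrArg₂ Prod.mk ?_ rfl
    rcases (by omega : dap < 0 ∨ (ea.length : Int) ≤ dap) with h | h
    · exact filter_enumerate_all ea dap 0 h
    · rw [filter_enumerate_slices ea dap 0 (by omega), show dap - 0 = dap by ring,
        List.take_of_length_le (by omega : ea.length ≤ dap.toNat),
        List.drop_of_length_le (by omega : ea.length ≤ dap.toNat + 1)]
      simp
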